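-- pv_equiv track=rewrite | github.com/YUSHACOD/advent_of_code | _2023_/python/day11/solution_part1.py | get_all_edges_between_galaxies
-- ===== SOURCE A (Python) =====
-- def get_all_edges_between_galaxies(map):
--     edges = set()
--     y, x = 0, 0
--
--     for y in range(len(map)):
--         for x in range(len(map[y])):
--             if map[y][x][0] == '#':
--                 j, i = 0, 0
--                 for j in range(len(map)):
--                     for i in range(len(map[j])):
--                         if map[j][i][0] == '#':
--                             if map[y][x][1] > map[j][i][1]:
--                                 if not (y == j and x == i):
--                                     edges.add((map[y][x][1], map[j][i][1],
--                                                (y, x), (j, i)))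
--                             else:
--                                 if not (y == j and x == i):
--                                     edges.add((map[j][i][1], map[y][x][1],
--                                                (j, i), (y, x)))
--
--     return edges
-- ===== SOURCE B (Python) =====
-- def get_all_edges_between_galaxies(map):
--     # one pass to collect galaxies, then iterate only over galaxy pairs
--     galaxies = [(map[y][x][1], (y, x))
--                 for y in range(len(map))
--                 for x in range(len(map[y]))
--                 if map[y][x][0] == '#']
--     edges = set()
--     for ga, pa in galaxies:
--         for gb, pb in galaxies:
--             if pa != pb:
--                 if ga > gb:
--                     edges.add((ga, gb, pa, pb))
--                 else:
--                     edges.add((gb, ga, pb, pa))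
--     return edges
-- ===== Notes on version B (the rewrite author's own statement) =====
-- stated objective: faster
-- what changed: B extracts the list of galaxy positions in one grid pass and then loops only over galaxy pairs, instead of rescanning the whole grid as the inner loop for every galaxy cell.
import Mathlib
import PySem

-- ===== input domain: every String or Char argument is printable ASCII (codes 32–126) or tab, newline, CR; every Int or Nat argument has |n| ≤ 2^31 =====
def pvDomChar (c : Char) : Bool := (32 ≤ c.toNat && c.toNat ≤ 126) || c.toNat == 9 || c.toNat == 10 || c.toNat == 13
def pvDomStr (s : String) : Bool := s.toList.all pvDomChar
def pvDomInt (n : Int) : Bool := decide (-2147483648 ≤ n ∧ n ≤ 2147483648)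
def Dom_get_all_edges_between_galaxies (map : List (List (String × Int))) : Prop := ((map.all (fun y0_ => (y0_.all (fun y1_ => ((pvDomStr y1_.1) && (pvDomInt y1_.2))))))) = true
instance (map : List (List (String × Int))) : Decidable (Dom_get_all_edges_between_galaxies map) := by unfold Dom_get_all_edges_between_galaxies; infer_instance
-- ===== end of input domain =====

-- B collects the galaxy cells in one grid pass and then iterates only over galaxy pairs,
-- instead of A's rescan of the whole grid for every galaxy cell; same returned set.


-- ===== PORT A =====
def get_all_edges_between_galaxies (map : List (List (String × Int))) : List (Int × Int × (Int × Int) × (Int × Int)) :=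
  let edges : PySem.Set (Int × Int × (Int × Int) × (Int × Int)) := PySem.Set.empty
  (PySem.List.pyRange 0 (PySem.List.len map) 1).foldl (fun edges y =>
    (PySem.List.pyRange 0 (PySem.List.len (PySem.List.pyGetD map y [])) 1).foldl (fun edges x =>
      if (PySem.List.pyGetD (PySem.List.pyGetD map y []) x ("", 0)).1 == "#" then
        (PySem.List.pyRange 0 (PySem.List.len map) 1).foldl (fun edges j =>
          (PySem.List.pyRange 0 (PySem.List.len (PySem.List.pyGetD map j [])) 1).foldl (fun edges i =>
            if (PySem.List.pyGetD (PySem.List.pyGetD map j []) i ("", 0)).1 == "#" then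
              if (PySem.List.pyGetD (PySem.List.pyGetD map y []) x ("", 0)).2 >
                 (PySem.List.pyGetD (PySem.List.pyGetD map j []) i ("", 0)).2 then
                if ¬ (y = j ∧ x = i) then
                  PySem.Set.add edges ((PySem.List.pyGetD (PySem.List.pyGetD map y []) x ("", 0)).2,
                                       (PySem.List.pyGetD (PySem.List.pyGetD map j []) i ("", 0)).2,
                                       (y, x), (j, i))
                else edges
              else
                if ¬ (y = j ∧ x = i) then
                  PySem.Set.add edges ((PySem.List.pyGetD (PySem.List.pyGetD map j []) i ("", 0)).2,
                                       (PySem.List.pyGetD (PySem.List.pyGetD map y []) x ("", 0)).2,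
                                       (j, i), (y, x))
                else edges
            else edges) edges) edges
      else edges) edges) edges

-- ===== PORT B =====
def get_all_edges_between_galaxies_alt (map : List (List (String × Int))) : List (Int × Int × (Int × Int) × (Int × Int)) :=
  let galaxies : List (Int × Int × Int) :=
    (PySem.List.pyRange 0 (PySem.List.len map) 1).foldl (fun acc y =>
      (PySem.List.pyRange 0 (PySem.List.len (PySem.List.pyGetD map y [])) 1).foldl (fun acc x =>
        if (PySem.List.pyGetD (PySem.List.pyGetD map y []) x ("", 0)).1 == "#" then
          acc ++ [((PySem.List.pyGetD (PySem.List.pyGetD map y []) x ("", 0)).2, y, x)]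
        else acc) acc) []
  galaxies.foldl (fun edges a =>
    galaxies.foldl (fun edges b =>
      if a.2 ≠ b.2 then
        if a.1 > b.1 then PySem.Set.add edges (a.1, b.1, a.2, b.2)
        else PySem.Set.add edges (b.1, a.1, b.2, a.2)
      else edges) edges)
    (PySem.Set.empty : PySem.Set (Int × Int × (Int × Int) × (Int × Int)))

-- ===== PRECONDITION & SPEC =====
def Spec_get_all_edges_between_galaxies (map : List (List (String × Int))) (out : List (Int × Int × (Int × Int) × (Int × Int))) : Prop := out = get_all_edges_between_galaxies_alt map
instance (map : List (List (String × Int))) (out : List (Int × Int × (Int × Int) × (Int × Int))) : Decidable (Spec_get_all_edges_between_galaxies map out) := by unfold Spec_get_all_edges_between_galaxies; infer_instance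

-- ===== CLAIM (what is proved, stated in full; the proofs are below) =====
def Claim_equal_get_all_edges_between_galaxies : Prop := ∀ (map : List (List (String × Int))), Dom_get_all_edges_between_galaxies map → Spec_get_all_edges_between_galaxies map (get_all_edges_between_galaxies map)

-- ===== LEMMAS AND PROOFS =====

-- the list of galaxies (value, y, x) in grid-scan order
def pvGalOf (map : List (List (String × Int))) : List (Int × Int × Int) :=
  (PySem.List.enumerate map 0).flatMap (fun yr =>
    ((PySem.List.enumerate yr.2 0).filter (fun xc => xc.2.1 == "#")).map
      (fun xc => (xc.2.2, yr.1, xc.1)))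

-- A's inner nested grid scan, for a fixed outer galaxy a = (value, y, x)
def pvInnerA (map : List (List (String × Int))) (a : Int × Int × Int)
    (edges : PySem.Set (Int × Int × (Int × Int) × (Int × Int))) :
    PySem.Set (Int × Int × (Int × Int) × (Int × Int)) :=
  (PySem.List.pyRange 0 (PySem.List.len map) 1).foldl (fun edges j =>
    (PySem.List.pyRange 0 (PySem.List.len (PySem.List.pyGetD map j [])) 1).foldl (fun edges i =>
      if (PySem.List.pyGetD (PySem.List.pyGetD map j []) i ("", 0)).1 == "#" then
        if a.1 > (PySem.List.pyGetD (PySem.List.pyGetD map j []) i ("", 0)).2 then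
          if ¬ (a.2.1 = j ∧ a.2.2 = i) then
            PySem.Set.add edges (a.1, (PySem.List.pyGetD (PySem.List.pyGetD map j []) i ("", 0)).2,
                                 (a.2.1, a.2.2), (j, i))
          else edges
        else
          if ¬ (a.2.1 = j ∧ a.2.2 = i) then
            PySem.Set.add edges ((PySem.List.pyGetD (PySem.List.pyGetD map j []) i ("", 0)).2, a.1,
                                 (j, i), (a.2.1, a.2.2))
          else edges
      else edges) edges) edges

-- A's per-pair body (after the grid scans are reduced to galaxy lists)
def pvBodyA (a : Int × Int × Int)
    (edges : PySem.Set (Int × Int × (Int × Int) × (Int × Int))) (b : Int × Int × Int) :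
    PySem.Set (Int × Int × (Int × Int) × (Int × Int)) :=
  if a.1 > b.1 then
    if ¬ (a.2.1 = b.2.1 ∧ a.2.2 = b.2.2) then
      PySem.Set.add edges (a.1, b.1, (a.2.1, a.2.2), (b.2.1, b.2.2))
    else edges
  else
    if ¬ (a.2.1 = b.2.1 ∧ a.2.2 = b.2.2) then
      PySem.Set.add edges (b.1, a.1, (b.2.1, b.2.2), (a.2.1, a.2.2))
    else edges

-- B's per-pair body
def pvBodyB (a : Int × Int × Int)
    (edges : PySem.Set (Int × Int × (Int × Int) × (Int × Int))) (b : Int × Int × Int) :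
    PySem.Set (Int × Int × (Int × Int) × (Int × Int)) :=
  if a.2 ≠ b.2 then
    if a.1 > b.1 then PySem.Set.add edges (a.1, b.1, a.2, b.2)
    else PySem.Set.add edges (b.1, a.1, b.2, a.2)
  else edges

-- a fold over range(len(xs)) whose body reads xs[k] is a fold over enumerate(xs)
theorem pv_foldl_pyRange_enumerate {α σ : Type} (xs : List α) (d : α)
    (F : σ → Int → α → σ) (init : σ) :
    (PySem.List.pyRange 0 (PySem.List.len xs) 1).foldl
        (fun s y => F s y (PySem.List.pyGetD xs y d)) init
      = (PySem.List.enumerate xs 0).foldl (fun s p => F s p.1 p.2) init := by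
  rw [PySem.List.enumerate_eq_map_pyRange (d := d), List.foldl_map]

-- the '#'-guarded double fold over all grid cells is a fold over pvGalOf
theorem pv_cellFold_eq {σ : Type} (map : List (List (String × Int)))
    (f : σ → Int × Int × Int → σ) (init : σ) :
    (PySem.List.pyRange 0 (PySem.List.len map) 1).foldl (fun s y =>
      (PySem.List.pyRange 0 (PySem.List.len (PySem.List.pyGetD map y [])) 1).foldl (fun s x =>
        if (PySem.List.pyGetD (PySem.List.pyGetD map y []) x ("", 0)).1 == "#" then
          f s ((PySem.List.pyGetD (PySem.List.pyGetD map y []) x ("", 0)).2, y, x)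
        else s) s) init
      = (pvGalOf map).foldl f init := by
  rw [pv_foldl_pyRange_enumerate map []
      (F := fun s y row =>
        (PySem.List.pyRange 0 (PySem.List.len row) 1).foldl (fun s x =>
          if (PySem.List.pyGetD row x ("", 0)).1 == "#" then
            f s ((PySem.List.pyGetD row x ("", 0)).2, y, x)
          else s) s)]
  rw [pvGalOf, List.foldl_flatMap]
  refine PySem.List.foldl_congr_mem _ _ _ _ (fun s yr _ => ?_)
  rw [pv_foldl_pyRange_enumerate yr.2 ("", 0)
      (F := fun s x c => if c.1 == "#" then f s (c.2, yr.1, x) else s)]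
  rw [PySem.List.foldl_if_eq_foldl_filter
      (p := fun xc : Int × String × Int => xc.2.1 == "#")
      (f := fun s xc => f s (xc.2.2, yr.1, xc.1)), ← List.foldl_map]

-- B's comprehension builds exactly pvGalOf
theorem pv_galaxies_eq (map : List (List (String × Int))) :
    (PySem.List.pyRange 0 (PySem.List.len map) 1).foldl (fun acc y =>
      (PySem.List.pyRange 0 (PySem.List.len (PySem.List.pyGetD map y [])) 1).foldl (fun acc x =>
        if (PySem.List.pyGetD (PySem.List.pyGetD map y []) x ("", 0)).1 == "#" then
          acc ++ [((PySem.List.pyGetD (PySem.List.pyGetD map y []) x ("", 0)).2, y, x)]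
        else acc) acc) ([] : List (Int × Int × Int))
      = pvGalOf map := by
  have h := pv_cellFold_eq map (fun acc p => acc ++ [p]) ([] : List (Int × Int × Int))
  rw [h, PySem.List.foldl_append_singleton_eq_self]
  simp

-- the two per-pair bodies agree
theorem pvBody_eq (a : Int × Int × Int) : pvBodyA a = pvBodyB a := by
  funext edges b
  unfold pvBodyA pvBodyB
  by_cases h : a.2 = b.2
  · simp [h]
  · have h' : ¬ (a.2.1 = b.2.1 ∧ a.2.2 = b.2.2) := by
      rintro ⟨h1, h2⟩
      exact h (Prod.ext h1 h2)
    simp [h, h']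

-- ===== VERDICT (by name: the statement is the Claim_ definition above) =====
theorem get_all_edges_between_galaxies_spec : Claim_equal_get_all_edges_between_galaxies := by
  intro map _
  show get_all_edges_between_galaxies map = get_all_edges_between_galaxies_alt map
  have hA : get_all_edges_between_galaxies map
      = (pvGalOf map).foldl (fun edges a => pvInnerA map a edges) PySem.Set.empty :=
    pv_cellFold_eq map (fun edges a => pvInnerA map a edges) PySem.Set.empty
  have hI : ∀ a edges, pvInnerA map a edges = (pvGalOf map).foldl (pvBodyA a) edges :=
    fun a edges => pv_cellFold_eq map (pvBodyA a) edges
  have hB : get_all_edges_between_galaxies_alt map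
      = (pvGalOf map).foldl (fun edges a => (pvGalOf map).foldl (pvBodyB a) edges)
          PySem.Set.empty := by
    have := congrArg
      (fun g : List (Int × Int × Int) =>
        g.foldl (fun edges a => g.foldl (pvBodyB a) edges)
          (PySem.Set.empty : PySem.Set (Int × Int × (Int × Int) × (Int × Int))))
      (pv_galaxies_eq map)
    exact this
  rw [hA, hB]
  refine PySem.List.foldl_congr_mem _ _ _ _ (fun edges a _ => ?_)
  rw [hI a edges, pvBody_eq a]
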